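-- pv_equiv track=rewrite | github.com/Bobcatsoap/jy-server | cell/RoomType13Calculator.py | find_three_with_single
-- ===== SOURCE A (Python) =====
-- def find_three_with_single(pre_card_val, card2, room_info):
--     """
--     找到手牌大于指定牌的所有3张
--     """
--     if len(card2) < 4:
--         return []
--     card_filter = set()
--     itm_cards = []
--     for k in card2:
--         if pre_card_val < k and card2.count(k) >= 3 and k not in card_filter:
--             if len(card2) > 3:
--                 itm_cards.append([k, k, k, -1])
--                 card_filter.add(k)
--     return itm_cards
-- ===== SOURCE B (Python) =====
-- def find_three_with_single(pre_card_val, card2, room_info):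
--     """
--     找到手牌大于指定牌的所有3张
--     """
--     if len(card2) < 4:
--         return []
--     out = []
--     rest = card2
--     while rest:
--         k = rest[0]
--         if pre_card_val < k and rest.count(k) >= 3:
--             out.append([k, k, k, -1])
--         rest = [x for x in rest if x != k]
--     return out
-- ===== Notes on version B (the rewrite author's own statement) =====
-- stated objective: alternative
-- what changed: Replaces A's per-element scan with seen-set dedup and full-list .count by a shrinking-worklist sweep: repeatedly take the first remaining value, test its multiplicity in the worklist, emit its triple, and delete all its occurrences, so no dedup set and no rescans of already-processed values are needed.
import Mathlib
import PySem

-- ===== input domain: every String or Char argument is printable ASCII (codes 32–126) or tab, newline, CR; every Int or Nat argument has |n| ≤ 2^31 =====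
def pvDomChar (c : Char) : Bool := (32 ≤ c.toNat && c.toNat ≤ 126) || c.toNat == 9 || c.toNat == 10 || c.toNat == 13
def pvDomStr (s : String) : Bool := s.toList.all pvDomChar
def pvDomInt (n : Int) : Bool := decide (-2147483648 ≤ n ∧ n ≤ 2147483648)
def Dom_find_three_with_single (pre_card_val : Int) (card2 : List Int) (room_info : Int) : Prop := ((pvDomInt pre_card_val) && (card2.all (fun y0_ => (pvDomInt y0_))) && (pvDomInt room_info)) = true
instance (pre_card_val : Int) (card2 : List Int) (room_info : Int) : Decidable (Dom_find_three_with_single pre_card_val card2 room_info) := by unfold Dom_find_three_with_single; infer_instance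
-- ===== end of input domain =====

-- B replaces A's per-element scan (seen-set dedup + full-list .count on every element) by a
-- shrinking-worklist sweep: take the first remaining value, test its multiplicity in the
-- worklist, then delete all of its occurrences (objective: alternative algorithm).

-- ===== PORT A =====
def find_three_with_single (pre_card_val : Int) (card2 : List Int) (room_info : Int) : List (List Int) :=
  if card2.length < 4 then []
  else
    -- state: (card_filter, itm_cards)
    (card2.foldl
      (fun (st : PySem.Set Int × List (List Int)) k =>
        if pre_card_val < k && 3 ≤ card2.count k && !(PySem.Set.contains st.1 k) then
          if 3 < card2.length then
            (PySem.Set.add st.1 k, st.2 ++ [[k, k, k, -1]])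
          else st
        else st)
      ((PySem.Set.empty : PySem.Set Int), ([] : List (List Int)))).2

-- ===== PORT B =====
-- the 'while rest:' loop of Source B: k = rest[0]; maybe emit; rest = [x for x in rest if x != k]
def pvSweep (pre_card_val : Int) : List Int → List (List Int)
  | [] => []
  | k :: xs =>
    (if pre_card_val < k && 3 ≤ (k :: xs).count k then [[k, k, k, -1]] else [])
      ++ pvSweep pre_card_val ((k :: xs).filter (fun x => !(x == k)))
  termination_by l => l.length
  decreasing_by
    simp only [List.filter_cons, beq_self_eq_true, Bool.not_true, Bool.false_eq_true,
      if_false, List.length_cons]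
    exact Nat.lt_succ_of_le (List.length_filter_le _ _)

def find_three_with_single_alt (pre_card_val : Int) (card2 : List Int) (room_info : Int) : List (List Int) :=
  if card2.length < 4 then []
  else pvSweep pre_card_val card2

-- ===== PRECONDITION & SPEC =====
def Spec_find_three_with_single (pre_card_val : Int) (card2 : List Int) (room_info : Int) (out : List (List Int)) : Prop := out = find_three_with_single_alt pre_card_val card2 room_info
instance (pre_card_val : Int) (card2 : List Int) (room_info : Int) (out : List (List Int)) : Decidable (Spec_find_three_with_single pre_card_val card2 room_info out) := by unfold Spec_find_three_with_single; infer_instance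

-- ===== CLAIM (what is proved, stated in full; the proofs are below) =====
def Claim_equal_find_three_with_single : Prop := ∀ (pre_card_val : Int) (card2 : List Int) (room_info : Int), Dom_find_three_with_single pre_card_val card2 room_info → Spec_find_three_with_single pre_card_val card2 room_info (find_three_with_single pre_card_val card2 room_info)

-- ===== LEMMAS AND PROOFS =====

-- A's loop body, once the always-true 'len(card2) > 3' branch is resolved, as a recursion.
def pvEmit (cond : Int → Bool) : List Int → PySem.Set Int → List (List Int)
  | [], _ => []
  | k :: xs, s =>
    if cond k && !(PySem.Set.contains s k) then
      [k, k, k, -1] :: pvEmit cond xs (PySem.Set.add s k)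
    else
      pvEmit cond xs s

theorem pvFoldl_eq_emit (cond : Int → Bool) (xs : List Int) (s : PySem.Set Int)
    (acc : List (List Int)) :
    (xs.foldl
      (fun (st : PySem.Set Int × List (List Int)) k =>
        if cond k && !(PySem.Set.contains st.1 k) then
          (PySem.Set.add st.1 k, st.2 ++ [[k, k, k, -1]])
        else st)
      (s, acc)).2 = acc ++ pvEmit cond xs s := by
  induction xs generalizing s acc with
  | nil => simp [pvEmit]
  | cons k xs ih =>
    rw [List.foldl_cons]
    dsimp only
    by_cases h : (cond k && !(PySem.Set.contains s k)) = true
    · rw [if_pos h, pvEmit, if_pos h, ih]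
      simp
    · rw [if_neg h, pvEmit, if_neg h, ih]

theorem pvEmit_eq_filter (cond : Int → Bool) (xs : List Int) (s : PySem.Set Int) :
    pvEmit cond xs s
      = ((PySem.Set.ofList xs).filter
          (fun k => cond k && !(PySem.Set.contains s k))).map (fun k => [k, k, k, -1]) := by
  induction xs generalizing s with
  | nil => simp [pvEmit, PySem.Set.ofList]
  | cons k xs ih =>
    rw [PySem.Set.ofList_cons]
    simp only [pvEmit, List.filter_cons]
    by_cases h : (cond k && !(PySem.Set.contains s k)) = true
    · rw [if_pos h, if_pos h, List.map_cons, ih]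
      congr 2
      rw [PySem.Set.discard, List.filter_filter]
      apply List.filter_congr
      intro y _
      by_cases hy : y = k
      · subst hy
        simp [PySem.Set.contains_eq_listContains, PySem.Set.mem_add]
      · simp [hy, PySem.Set.contains_eq_listContains, PySem.Set.mem_add]
    · rw [if_neg h, if_neg h, ih]
      congr 1
      rw [PySem.Set.discard, List.filter_filter]
      apply List.filter_congr
      intro y _
      by_cases hy : y = k
      · subst hy
        simp only [Bool.and_eq_true] at h ⊢
        simp [PySem.Set.contains_eq_listContains] at h ⊢
        tauto
      · simp [hy]

-- dedup (first occurrences) commutes with deleting all occurrences of one value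
theorem pvOfList_filter_ne (k : Int) (xs : List Int) :
    PySem.Set.ofList (xs.filter (fun x => !(x == k)))
      = (PySem.Set.ofList xs).filter (fun x => !(x == k)) := by
  induction xs with
  | nil => simp [PySem.Set.ofList]
  | cons a xs ih =>
    rw [List.filter_cons, PySem.Set.ofList_cons]
    by_cases ha : a = k
    · subst ha
      simp only [beq_self_eq_true, Bool.not_true, Bool.false_eq_true, if_false,
        List.filter_cons, ih, PySem.Set.discard, List.filter_filter]
      apply List.filter_congr
      intro y _
      by_cases hy : y = a <;> simp [hy]
    · have hb : (!(a == k)) = true := by simp [ha]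
      rw [if_pos hb, PySem.Set.ofList_cons, List.filter_cons, hb, if_pos rfl, ih]
      simp only [PySem.Set.discard, List.filter_filter]
      congr 1
      apply List.filter_congr
      intro y _
      by_cases hy : y = a <;> by_cases hk : y = k <;> simp [hy, hk, Bool.and_comm]


theorem pvSweep_nil (pre_card_val : Int) : pvSweep pre_card_val [] = [] := by
  rw [pvSweep.eq_def]

theorem pvSweep_cons (pre_card_val k : Int) (xs : List Int) :
    pvSweep pre_card_val (k :: xs)
      = (if pre_card_val < k && 3 ≤ (k :: xs).count k then [[k, k, k, -1]] else [])
          ++ pvSweep pre_card_val (xs.filter (fun x => !(x == k))) := by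
  rw [pvSweep.eq_def]
  simp only [List.filter_cons, beq_self_eq_true, Bool.not_true, Bool.false_eq_true, if_false]

-- B's sweep computes the same filter-map over the first-occurrence dedup.
theorem pvSweep_eq_filter (pre_card_val : Int) (l : List Int) :
    pvSweep pre_card_val l
      = ((PySem.Set.ofList l).filter
          (fun k => pre_card_val < k && 3 ≤ l.count k)).map (fun k => [k, k, k, -1]) := by
  generalize hn : l.length = n
  induction n using Nat.strong_induction_on generalizing l with
  | _ n ih =>
    cases l with
    | nil => rw [pvSweep_nil]; simp [PySem.Set.ofList]
    | cons k xs =>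
      rw [pvSweep_cons, PySem.Set.ofList_cons, List.filter_cons]
      have hlt : (xs.filter (fun x => !(x == k))).length < n := by
        subst hn
        exact Nat.lt_succ_of_le (List.length_filter_le _ _)
      rw [ih _ hlt _ rfl, pvOfList_filter_ne]
      by_cases hk : (pre_card_val < k && 3 ≤ (k :: xs).count k) = true
      · rw [if_pos hk, if_pos hk]
        simp only [List.map_cons, List.cons_append, List.nil_append]
        congr 2
        rw [PySem.Set.discard, List.filter_filter, List.filter_filter]
        rw [List.filter_congr]
        intro y hy
        by_cases hyk : y = k
        · simp [hyk]
        · have : (xs.filter (fun x => !(x == k))).count y = (k :: xs).count y := by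
            have hky : ¬k = y := fun h => hyk h.symm
            rw [List.count_filter (by simp [hyk])]
            simp [hky]
          simp [this]
      · rw [if_neg hk, if_neg hk, List.nil_append]
        rw [PySem.Set.discard, List.filter_filter, List.filter_filter]
        rw [List.filter_congr]
        intro y hy
        by_cases hyk : y = k
        · simp [hyk]
        · have : (xs.filter (fun x => !(x == k))).count y = (k :: xs).count y := by
            have hky : ¬k = y := fun h => hyk h.symm
            rw [List.count_filter (by simp [hyk])]
            simp [hky]
          simp [this]

-- ===== VERDICT (by name: the statement is the Claim_ definition above) =====
theorem find_three_with_single_spec : Claim_equal_find_three_with_single := by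
  intro pre_card_val card2 room_info _
  unfold Spec_find_three_with_single
  by_cases h : card2.length < 4
  · unfold find_three_with_single find_three_with_single_alt
    rw [if_pos h, if_pos h]
  · unfold find_three_with_single find_three_with_single_alt
    rw [if_neg h, if_neg h, pvSweep_eq_filter]
    have hlen : (3 < card2.length) = True := by simp; omega
    have hcong :
        (fun (st : PySem.Set Int × List (List Int)) k =>
          if pre_card_val < k && 3 ≤ card2.count k && !(PySem.Set.contains st.1 k) then
            if 3 < card2.length then (PySem.Set.add st.1 k, st.2 ++ [[k, k, k, -1]]) else st
          else st)
        = (fun (st : PySem.Set Int × List (List Int)) k =>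
          if (fun k => pre_card_val < k && 3 ≤ card2.count k) k
              && !(PySem.Set.contains st.1 k) then
            (PySem.Set.add st.1 k, st.2 ++ [[k, k, k, -1]])
          else st) := by
      funext st k
      simp only [hlen, if_true]
    rw [hcong, pvFoldl_eq_emit, pvEmit_eq_filter]
    simp [PySem.Set.contains_eq_listContains]
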